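-- pv_equiv track=rewrite | github.com/lordyhas/python_scientific_calculus | main/logic.py | ni_modal
-- ===== SOURCE A (Python) =====
-- def ni_modal(niList):
--     m = max(niList)
--     count = 0
--     L = []
--     for i in range(len(niList)):
--         if (niList[i] == m):
--             L += [i]
--
--     return (m, L)
-- ===== SOURCE B (Python) =====
-- def ni_modal(niList):
--     # B: one pass keeping the running max and the list of its indices (A scans twice: max, then an index loop).
--     started = False
--     m = None
--     L = []
--     for i, v in enumerate(niList):
--         if not started:
--             started = True
--             m = v
--             L = [i]
--         elif v > m:
--             m = v
--             L = [i]
--         elif v == m: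
--             L.append(i)
--     if not started:
--         raise ValueError('max() arg is an empty sequence')
--     return (m, L)
-- ===== Notes on version B (the rewrite author's own statement) =====
-- stated objective: alternative
-- what changed: B replaces A's two scans (max() over the list, then an index loop collecting positions equal to that max) with a single enumerate pass maintaining the running maximum and its index list.
import Mathlib
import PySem

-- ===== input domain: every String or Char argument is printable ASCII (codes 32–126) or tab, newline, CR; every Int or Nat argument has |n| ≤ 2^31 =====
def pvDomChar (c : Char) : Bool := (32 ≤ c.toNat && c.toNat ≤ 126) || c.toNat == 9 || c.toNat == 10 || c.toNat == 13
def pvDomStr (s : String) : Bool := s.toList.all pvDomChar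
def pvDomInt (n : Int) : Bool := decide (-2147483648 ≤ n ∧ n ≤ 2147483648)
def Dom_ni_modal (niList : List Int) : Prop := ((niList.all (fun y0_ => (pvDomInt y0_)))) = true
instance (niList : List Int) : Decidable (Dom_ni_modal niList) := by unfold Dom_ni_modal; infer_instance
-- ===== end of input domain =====

-- B replaces A's two scans (max, then an index-collecting loop) with one enumerate pass
-- maintaining the running maximum and its index list (objective: alternative single-pass algorithm).


-- ===== PORT A =====
-- m = max(niList) (raises on []: excluded by Pre_, .getD 0 is never reached there);
-- the loop indexes niList[i] with 0 <= i < len, so pyGetD is exact.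
def ni_modal (niList : List Int) : Int × List Int :=
  let m := (PySem.List.max? niList id).getD 0
  let L := (PySem.List.pyRange 0 niList.length 1).foldl
      (fun L i => if PySem.List.pyGetD niList i 0 = m then L ++ [i] else L) ([] : List Int)
  (m, L)

-- ===== PORT B =====
-- state = (started, m, L); one step of B's loop body
def pvStep (s : Bool × Int × List Int) (p : Int × Int) : Bool × Int × List Int :=
  if !s.1 then (true, p.2, [p.1])
  else if s.2.1 < p.2 then (true, p.2, [p.1])
  else if p.2 = s.2.1 then (s.1, s.2.1, s.2.2 ++ [p.1])
  else s

def ni_modal_alt (niList : List Int) : Int × List Int :=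
  let st := (PySem.List.enumerate niList).foldl pvStep (false, 0, [])
  (st.2.1, st.2.2)

-- ===== PRECONDITION & SPEC =====
-- Pre_ excludes the empty list, on which both A (max([])) and B raise ValueError.
def Pre_ni_modal (niList : List Int) : Prop := niList ≠ []
instance (niList : List Int) : Decidable (Pre_ni_modal niList) := by unfold Pre_ni_modal; infer_instance
def pvWitness_ni_modal : List Int := ([1, 2, 2] : List Int)
def Spec_ni_modal (niList : List Int) (out : Int × List Int) : Prop := out = ni_modal_alt niList
instance (niList : List Int) (out : Int × List Int) : Decidable (Spec_ni_modal niList out) := by unfold Spec_ni_modal; infer_instance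

-- ===== CLAIM (what is proved, stated in full; the proofs are below) =====
def Claim_equal_ni_modal : Prop := ∀ (niList : List Int), Dom_ni_modal niList → Pre_ni_modal niList → Spec_ni_modal niList (ni_modal niList)

-- ===== LEMMAS AND PROOFS =====

-- indices (starting at a) of the elements of the list equal to m
def pvIdxs (m a : Int) : List Int → List Int
  | [] => []
  | v :: t => (if v = m then [a] else []) ++ pvIdxs m (a + 1) t

theorem pv_max?_cons (v : Int) (t : List Int) :
    PySem.List.max? (v :: t) id = some (t.foldl max v) := by
  unfold PySem.List.max?
  rw [List.foldl_cons]
  exact List.foldl_hom some (fun x y => by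
    show (if id x < id y then some y else some x) = some (max x y)
    simp only [id_eq]
    rcases lt_or_ge x y with h | h
    · rw [if_pos h, max_eq_right h.le]
    · rw [if_neg (not_lt.mpr h), max_eq_left h])

theorem pv_B_fold (t : List Int) : ∀ (a m : Int) (L : List Int),
    (PySem.List.enumerate t a).foldl pvStep (true, m, L)
      = (true, t.foldl max m,
          (if t.foldl max m = m then L else []) ++ pvIdxs (t.foldl max m) a t) := by
  induction t with
  | nil => intro a m L; simp [PySem.List.enumerate_nil, pvIdxs]
  | cons v t ih =>
      intro a m L
      rw [PySem.List.enumerate_cons, List.foldl_cons, List.foldl_cons]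
      simp only [pvIdxs]
      have hle : ∀ (b : Int), b ≤ t.foldl max b := fun b => (PySem.List.le_foldl_max t b).1
      rcases lt_trichotomy m v with h | h | h
      · -- v > m : reset to ([a], v)
        have hstep : pvStep (true, m, L) (a, v) = (true, v, [a]) := by
          simp [pvStep, h]
        have hmax : max m v = v := max_eq_right h.le
        rw [hstep, ih (a + 1) v [a], hmax]
        have hne : t.foldl max v ≠ m := by have := hle v; omega
        rw [if_neg hne, List.nil_append]
        rcases eq_or_ne (t.foldl max v) v with he | he
        · rw [if_pos he, if_pos he.symm]
        · rw [if_neg he, if_neg (Ne.symm he), List.nil_append]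
      · -- v = m : append the index
        cases h
        have hstep : pvStep (true, v, L) (a, v) = (true, v, L ++ [a]) := by
          simp [pvStep]
        rw [hstep, ih (a + 1) v (L ++ [a]), max_self]
        rcases eq_or_ne (t.foldl max v) v with he | he
        · rw [if_pos he, if_pos he, if_pos he.symm, List.append_assoc]
        · rw [if_neg he, if_neg he, if_neg (Ne.symm he), List.nil_append, List.nil_append]
      · -- v < m : state unchanged
        have hstep : pvStep (true, m, L) (a, v) = (true, m, L) := by
          simp only [pvStep, Bool.not_true]
          rw [if_neg (by simp), if_neg (by omega), if_neg (by omega)]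
        have hmax : max m v = m := max_eq_left h.le
        rw [hstep, ih (a + 1) m L, hmax]
        have hvne : v ≠ t.foldl max m := by have := hle m; omega
        rw [if_neg hvne, List.nil_append]

theorem pv_A_fold (xs : List Int) (m : Int) : ∀ (k a : Nat) (acc : List Int),
    xs.length = a + k →
    (PySem.List.pyRange a xs.length 1).foldl
        (fun L i => if PySem.List.pyGetD xs i 0 = m then L ++ [i] else L) acc
      = acc ++ pvIdxs m a (xs.drop a) := by
  intro k
  induction k with
  | zero =>
      intro a acc h
      have h1 : (xs.length : Int) ≤ (a : Int) := by exact_mod_cast (by omega : xs.length ≤ a)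
      rw [PySem.List.pyRange_one_eq_nil h1]
      have hd : xs.drop a = [] := List.drop_eq_nil_of_le (by omega)
      simp [hd, pvIdxs]
  | succ k ih =>
      intro a acc h
      have hlt : a < xs.length := by omega
      have h1 : (a : Int) < (xs.length : Int) := by exact_mod_cast hlt
      rw [PySem.List.pyRange_one_cons h1, List.foldl_cons]
      have hget : PySem.List.pyGetD xs (a : Int) 0 = xs[a] := by
        rw [PySem.List.pyGetD_natCast]
        exact List.getD_eq_getElem xs 0 hlt
      have hcast : ((a : Int) + 1) = ((a + 1 : Nat) : Int) := by push_cast; ring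
      have hdrop : xs.drop a = xs[a] :: xs.drop (a + 1) := List.drop_eq_getElem_cons hlt
      rw [hget, hcast, ih (a + 1) _ (by omega), hdrop]
      simp only [pvIdxs, ← hcast]
      rcases eq_or_ne (xs[a]) m with he | he
      · rw [if_pos he, if_pos he, List.append_assoc]
      · rw [if_neg he, if_neg he, List.nil_append]

theorem pv_main (v : Int) (t : List Int) : ni_modal (v :: t) = ni_modal_alt (v :: t) := by
  have hA : ni_modal (v :: t) = (t.foldl max v, pvIdxs (t.foldl max v) 0 (v :: t)) := by
    have hfold := pv_A_fold (v :: t) (t.foldl max v) (v :: t).length 0 [] (by omega)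
    simp only [Nat.cast_zero, List.drop_zero, List.nil_append] at hfold
    simp only [ni_modal, pv_max?_cons, Option.getD_some, hfold]
  have hB : ni_modal_alt (v :: t)
      = (t.foldl max v,
          (if t.foldl max v = v then [(0 : Int)] else []) ++ pvIdxs (t.foldl max v) 1 t) := by
    have hstep : pvStep (false, 0, []) (0, v) = (true, v, [(0 : Int)]) := by
      simp [pvStep]
    simp only [ni_modal_alt, PySem.List.enumerate_cons, List.foldl_cons, hstep, zero_add,
      pv_B_fold t 1 v [(0 : Int)]]
  rw [hA, hB]
  simp only [pvIdxs, zero_add]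
  rcases eq_or_ne v (t.foldl max v) with he | he
  · rw [if_pos he, if_pos he.symm]
  · rw [if_neg he, if_neg (Ne.symm he), List.nil_append]

-- ===== VERDICT (by name: the statement is the Claim_ definition above) =====
theorem ni_modal_spec : Claim_equal_ni_modal := by
  intro niList _ hpre
  unfold Spec_ni_modal
  cases niList with
  | nil => exact absurd rfl hpre
  | cons v t => exact pv_main v t
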